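-- pv_equiv track=rewrite | github.com/pypi-data/pypi-mirror-395 | packages/basketcase/basketcase-8.0.0-py3-none-any.whl/basketcase/extractor.py | find_best_image
-- ===== SOURCE A (Python) =====
-- def find_best_image(
--
--         candidates: list,
--         original_width: int = None,
--         original_height: int = None,
--         field_name_width: str = 'width',
--         field_name_height: str = 'height') -> dict:
--     """
--     Get the best image candidate from a list of image versions.
--
--     The parameters "original_height" and "original_width" are
--     sometimes provided by Instagram in the image metadata. If not
--     specified, the largest calculated resolution is chosen.
--
--     Sometimes the key in the metadata that corresponds to
--     width and height are not named exactly "width" and "height".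
--     The parameters "field_name_width" and "field_name_height"
--     allow you to specify the correct key.
--
--     Returns a dictionary containing the selected image metadata.
--
--     Arguments:
--         original_height -- Usually found in the image metadata.
--         original_width -- Usually found in the image metadata.
--         candidates -- List of image candidates.
--         field_name_width -- Override the expected key name.
--         field_name_height -- Override the expected key name.
--     """
--     selected = candidates[0]
--
--     for candidate in candidates:
--         if ((original_height and original_width)
--                 and (candidate[field_name_width] == original_width
--                 and candidate[field_name_height] == original_height)):
--             selected = candidate
--             break
--
--         if ((candidate[field_name_width] + candidate[field_name_height])
--                 > (selected[field_name_width] + selected[field_name_height])):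
--             selected = candidate
--
--     return selected
-- ===== SOURCE B (Python) =====
-- def find_best_image(
--         candidates: list,
--         original_width: int = None,
--         original_height: int = None,
--         field_name_width: str = 'width',
--         field_name_height: str = 'height') -> dict:
--     # Two separate passes instead of A's interleaved scan:
--     # exact-match search first (only when both originals are truthy),
--     # otherwise max by resolution sum (first among ties, like A's strict '>').
--     if original_width and original_height:
--         for candidate in candidates:
--             if (candidate[field_name_width] == original_width
--                     and candidate[field_name_height] == original_height):
--                 return candidate
--     return max(candidates,
--                key=lambda c: c[field_name_width] + c[field_name_height])
-- ===== Notes on version B (the rewrite author's own statement) =====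
-- stated objective: simpler
-- what changed: Replaces A's single loop that interleaves the exact-match test with a running best-sum accumulator by two independent passes: a plain first-match search (only when both originals are truthy) and a max(..., key=sum) call.
import Mathlib
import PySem

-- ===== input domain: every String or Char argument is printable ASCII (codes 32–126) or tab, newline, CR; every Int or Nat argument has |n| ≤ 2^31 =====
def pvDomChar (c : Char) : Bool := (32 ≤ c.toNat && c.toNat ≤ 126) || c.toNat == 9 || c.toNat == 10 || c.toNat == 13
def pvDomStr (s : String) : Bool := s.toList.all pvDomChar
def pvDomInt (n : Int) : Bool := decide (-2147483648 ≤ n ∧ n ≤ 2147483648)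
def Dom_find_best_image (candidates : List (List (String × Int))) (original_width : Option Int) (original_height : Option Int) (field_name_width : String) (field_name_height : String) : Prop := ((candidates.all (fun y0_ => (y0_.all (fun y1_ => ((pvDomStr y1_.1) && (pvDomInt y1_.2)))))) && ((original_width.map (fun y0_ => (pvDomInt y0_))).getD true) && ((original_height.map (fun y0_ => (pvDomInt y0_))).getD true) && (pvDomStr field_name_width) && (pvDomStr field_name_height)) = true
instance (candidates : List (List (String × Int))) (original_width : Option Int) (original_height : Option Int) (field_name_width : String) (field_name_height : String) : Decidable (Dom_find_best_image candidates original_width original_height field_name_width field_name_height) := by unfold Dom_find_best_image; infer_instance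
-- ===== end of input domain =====

-- ===== PORT A =====
-- B rewrites A's interleaved scan as two independent passes (match search, then max by sum); proved equal under Pre_.
-- Both ports are about the RETURN value only (A mutates nothing).

-- total stand-in for Python's d[key] (first match in the assoc list); Pre_ guarantees the key
-- is present on every candidate, so the .getD 0 default is never used on admitted inputs.
def pvLook (d : List (String × Int)) (k : String) : Int :=
  (((d.find? (fun p => p.1 == k)).map (·.2)).getD 0)

-- Python truthiness of the optional ints: None and 0 are falsy.
def pvTruthy (o : Option Int) : Bool := o.getD 0 != 0

-- the 'for candidate in candidates' loop of A, carrying 'selected'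
def pvLoopA (fw fh : String) (ow oh : Option Int) (rest : List (List (String × Int)))
    (selected : List (String × Int)) : List (String × Int) :=
  match rest with
  | [] => selected
  | c :: rest' =>
    if (pvTruthy oh && pvTruthy ow) &&
        (pvLook c fw == ow.getD 0 && pvLook c fh == oh.getD 0) then
      c                                   -- 'selected = candidate; break'
    else if pvLook c fw + pvLook c fh > pvLook selected fw + pvLook selected fh then
      pvLoopA fw fh ow oh rest' c
    else
      pvLoopA fw fh ow oh rest' selected

def find_best_image (candidates : List (List (String × Int))) (original_width : Option Int) (original_height : Option Int) (field_name_width : String) (field_name_height : String) : List (String × Int) :=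
  match candidates with
  | [] => []                              -- Python raises IndexError here; excluded by Pre_
  | c0 :: _ => pvLoopA field_name_width field_name_height original_width original_height candidates c0

-- ===== PORT B =====
-- B's first pass: the for-loop returning the first exact match
def pvFindMatch (fw fh : String) (ow oh : Option Int) :
    List (List (String × Int)) → Option (List (String × Int))
  | [] => none
  | c :: rest =>
    if pvLook c fw == ow.getD 0 && pvLook c fh == oh.getD 0 then some c
    else pvFindMatch fw fh ow oh rest

-- the 'key=lambda c: c[w]+c[h]' comparison step of B's max(...) call
def pvStep (fw fh : String) (best c : List (String × Int)) : List (String × Int) :=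
  if pvLook c fw + pvLook c fh > pvLook best fw + pvLook best fh then c else best

-- B's second pass: max(candidates, key=sum) — Python keeps the FIRST maximal element
def pvMaxBySum (fw fh : String) : List (List (String × Int)) → List (String × Int)
  | [] => []                              -- Python raises ValueError here; excluded by Pre_
  | c0 :: rest => rest.foldl (pvStep fw fh) c0

def find_best_image_alt (candidates : List (List (String × Int))) (original_width : Option Int) (original_height : Option Int) (field_name_width : String) (field_name_height : String) : List (String × Int) :=
  if pvTruthy original_width && pvTruthy original_height then
    match pvFindMatch field_name_width field_name_height original_width original_height candidates with
    | some c => c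
    | none => pvMaxBySum field_name_width field_name_height candidates
  else pvMaxBySum field_name_width field_name_height candidates

-- ===== PRECONDITION & SPEC =====
-- Pre_ excludes the empty list (A raises IndexError) and lists with a candidate missing the width
-- or height key, on which A raises KeyError except in the accidental corner where an exact match
-- precedes the defective candidate (there A and B both still return that match).
def Pre_find_best_image (candidates : List (List (String × Int))) (original_width : Option Int) (original_height : Option Int) (field_name_width : String) (field_name_height : String) : Prop :=
  candidates ≠ [] ∧ ∀ c ∈ candidates,
    (c.find? (fun p => p.1 == field_name_width)).isSome ∧
    (c.find? (fun p => p.1 == field_name_height)).isSome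
instance (candidates : List (List (String × Int))) (original_width : Option Int) (original_height : Option Int) (field_name_width : String) (field_name_height : String) : Decidable (Pre_find_best_image candidates original_width original_height field_name_width field_name_height) := by unfold Pre_find_best_image; infer_instance

def pvWitness_find_best_image : (List (List (String × Int))) × Option Int × Option Int × String × String :=
  ([[("width", 3), ("height", 2)], [("width", 1), ("height", 5)]], some 1, none, "width", "height")

def Spec_find_best_image (candidates : List (List (String × Int))) (original_width : Option Int) (original_height : Option Int) (field_name_width : String) (field_name_height : String) (out : List (String × Int)) : Prop := out = find_best_image_alt candidates original_width original_height field_name_width field_name_height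
instance (candidates : List (List (String × Int))) (original_width : Option Int) (original_height : Option Int) (field_name_width : String) (field_name_height : String) (out : List (String × Int)) : Decidable (Spec_find_best_image candidates original_width original_height field_name_width field_name_height out) := by unfold Spec_find_best_image; infer_instance

-- ===== CLAIM (what is proved, stated in full; the proofs are below) =====
def Claim_equal_find_best_image : Prop := ∀ (candidates : List (List (String × Int))) (original_width : Option Int) (original_height : Option Int) (field_name_width : String) (field_name_height : String), Dom_find_best_image candidates original_width original_height field_name_width field_name_height → Pre_find_best_image candidates original_width original_height field_name_width field_name_height → Spec_find_best_image candidates original_width original_height field_name_width field_name_height (find_best_image candidates original_width original_height field_name_width field_name_height)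

-- ===== LEMMAS AND PROOFS =====

theorem step_gt (fw fh : String) (best c : List (String × Int))
    (hc : pvLook c fw + pvLook c fh > pvLook best fw + pvLook best fh) :
    pvStep fw fh best c = c := by unfold pvStep; rw [if_pos hc]

theorem step_le (fw fh : String) (best c : List (String × Int))
    (hc : ¬ pvLook c fw + pvLook c fh > pvLook best fw + pvLook best fh) :
    pvStep fw fh best c = best := by unfold pvStep; rw [if_neg hc]

-- one-step unfoldings of the recursive helpers (definitional)
theorem loopA_cons (fw fh : String) (ow oh : Option Int) (c : List (String × Int))
    (rest' : List (List (String × Int))) (selected : List (String × Int)) :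
    pvLoopA fw fh ow oh (c :: rest') selected =
      if ((pvTruthy oh && pvTruthy ow) &&
          (pvLook c fw == ow.getD 0 && pvLook c fh == oh.getD 0)) = true then c
      else if pvLook c fw + pvLook c fh > pvLook selected fw + pvLook selected fh then
        pvLoopA fw fh ow oh rest' c
      else pvLoopA fw fh ow oh rest' selected := rfl

theorem findMatch_cons (fw fh : String) (ow oh : Option Int) (c : List (String × Int))
    (rest' : List (List (String × Int))) :
    pvFindMatch fw fh ow oh (c :: rest') =
      if (pvLook c fw == ow.getD 0 && pvLook c fh == oh.getD 0) = true then some c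
      else pvFindMatch fw fh ow oh rest' := rfl

-- when the originals are falsy, A's loop is exactly B's max-scan fold
theorem loopA_falsy (fw fh : String) (ow oh : Option Int)
    (h : (pvTruthy oh && pvTruthy ow) = false) :
    ∀ (rest : List (List (String × Int))) (selected : List (String × Int)),
      pvLoopA fw fh ow oh rest selected = rest.foldl (pvStep fw fh) selected := by
  intro rest
  induction rest with
  | nil => intro selected; simp [pvLoopA]
  | cons c rest' ih =>
    intro selected
    rw [loopA_cons, h, Bool.false_and, List.foldl_cons, if_neg (by decide)]
    by_cases hc : pvLook c fw + pvLook c fh > pvLook selected fw + pvLook selected fh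
    · rw [if_pos hc, step_gt fw fh selected c hc, ih]
    · rw [if_neg hc, step_le fw fh selected c hc, ih]

-- when the originals are truthy, A's loop is B's match-search with B's max-scan as fallback
theorem loopA_truthy (fw fh : String) (ow oh : Option Int)
    (h : (pvTruthy oh && pvTruthy ow) = true) :
    ∀ (rest : List (List (String × Int))) (selected : List (String × Int)),
      pvLoopA fw fh ow oh rest selected =
        match pvFindMatch fw fh ow oh rest with
        | some c => c
        | none => rest.foldl (pvStep fw fh) selected := by
  intro rest
  induction rest with
  | nil => intro selected; simp [pvLoopA, pvFindMatch]
  | cons c rest' ih =>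
    intro selected
    rw [loopA_cons, findMatch_cons, h, Bool.true_and]
    by_cases hm : (pvLook c fw == ow.getD 0 && pvLook c fh == oh.getD 0) = true
    · rw [if_pos hm, if_pos hm]
    · rw [if_neg hm, if_neg hm, List.foldl_cons]
      by_cases hc : pvLook c fw + pvLook c fh > pvLook selected fw + pvLook selected fh
      · rw [if_pos hc, step_gt fw fh selected c hc, ih]
      · rw [if_neg hc, step_le fw fh selected c hc, ih]

-- the first iteration of A's loop (selected = candidates[0]) never changes 'selected'
theorem loopA_head (fw fh : String) (ow oh : Option Int) (c0 : List (String × Int))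
    (rest : List (List (String × Int)))
    (hm : ((pvTruthy oh && pvTruthy ow) &&
           (pvLook c0 fw == ow.getD 0 && pvLook c0 fh == oh.getD 0)) = false) :
    pvLoopA fw fh ow oh (c0 :: rest) c0 = pvLoopA fw fh ow oh rest c0 := by
  rw [loopA_cons, hm, if_neg (by decide), if_neg (lt_irrefl _)]

-- ===== VERDICT (by name: the statement is the Claim_ definition above) =====
theorem find_best_image_spec : Claim_equal_find_best_image := by
  intro candidates ow oh fw fh _ hpre
  cases candidates with
  | nil => exact absurd rfl hpre.1
  | cons c0 rest =>
    have redA : find_best_image (c0 :: rest) ow oh fw fh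
        = pvLoopA fw fh ow oh (c0 :: rest) c0 := rfl
    unfold Spec_find_best_image find_best_image_alt
    rw [redA]
    by_cases ht : (pvTruthy oh && pvTruthy ow) = true
    · have ht' : (pvTruthy ow && pvTruthy oh) = true := by
        rcases (Bool.and_eq_true ..).mp ht with ⟨h1, h2⟩; simp [h1, h2]
      rw [if_pos ht']
      by_cases hm : (pvLook c0 fw == ow.getD 0 && pvLook c0 fh == oh.getD 0) = true
      · rw [loopA_cons, findMatch_cons, ht, Bool.true_and, if_pos hm, if_pos hm]
      · rw [Bool.not_eq_true] at hm
        rw [loopA_head fw fh ow oh c0 rest (by rw [hm]; simp),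
            loopA_truthy fw fh ow oh ht rest c0,
            findMatch_cons, if_neg (by simp [hm])]
        cases pvFindMatch fw fh ow oh rest with
        | some c => rfl
        | none => rfl
    · rw [Bool.not_eq_true] at ht
      have ht' : (pvTruthy ow && pvTruthy oh) = false := by
        cases h1 : pvTruthy ow <;> cases h2 : pvTruthy oh <;> simp_all
      rw [if_neg (by simp [ht']),
          loopA_head fw fh ow oh c0 rest (by rw [ht]; simp),
          loopA_falsy fw fh ow oh ht rest c0]
      rfl
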